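-- pv_equiv track=rewrite | github.com/shyam20433/Python_probelms | day 3/flames.py | flames_calculator
-- ===== SOURCE A (Python) =====
-- def flames_calculator(name1, name2):
--     stack = list(name1)
--     stack2 = []
--
--     for i in name2:
--         if i in stack:
--             stack.remove(i)
--         else:
--             stack2.append(i)
--
--     return stack + stack2
-- ===== SOURCE B (Python) =====
-- def flames_calculator(name1, name2):
--     def leftovers(a, b):
--         remaining = {}
--         for ch in b:
--             remaining[ch] = remaining.get(ch, 0) + 1
--         out = []
--         for ch in a:
--             if remaining.get(ch, 0) > 0:
--                 remaining[ch] = remaining[ch] - 1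
--             else:
--                 out.append(ch)
--         return out
--     return leftovers(name1, name2) + leftovers(name2, name1)
-- ===== Notes on version B (the rewrite author's own statement) =====
-- stated objective: faster
-- what changed: Replaces A's single pass over name2 that mutates a list copy of name1 with list.remove (a linear scan per char) by one symmetric helper run twice: build a character-count dict of the other name, then scan each name once, decrementing counts for matched chars and keeping the unmatched ones.
import Mathlib
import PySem

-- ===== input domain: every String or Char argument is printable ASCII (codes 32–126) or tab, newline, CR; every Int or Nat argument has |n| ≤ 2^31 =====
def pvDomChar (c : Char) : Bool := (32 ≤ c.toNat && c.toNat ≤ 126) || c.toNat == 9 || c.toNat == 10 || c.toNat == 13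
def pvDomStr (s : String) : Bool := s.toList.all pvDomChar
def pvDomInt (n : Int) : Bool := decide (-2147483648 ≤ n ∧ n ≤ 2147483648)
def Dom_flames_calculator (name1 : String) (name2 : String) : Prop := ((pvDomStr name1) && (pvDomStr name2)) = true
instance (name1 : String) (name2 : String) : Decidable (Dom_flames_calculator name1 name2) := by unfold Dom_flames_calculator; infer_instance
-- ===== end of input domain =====

-- B replaces A's mutate-and-remove pass (a linear scan per name2 char) by one symmetric
-- count-dict helper run on each name; alternative decomposition, return value identical.

-- ===== PORT A =====
-- stack = list(name1); for i in name2: if i in stack: stack.remove(i) else: stack2.append(i); return stack + stack2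
def flames_calculator (name1 : String) (name2 : String) : List String :=
  let fin := name2.toList.foldl
    (fun (st : List Char × List Char) i =>
      if i ∈ st.1 then (st.1.erase i, st.2) else (st.1, st.2 ++ [i]))
    (name1.toList, ([] : List Char))
  (fin.1 ++ fin.2).map (fun c => c.toString)

-- ===== PORT B =====
-- helper leftovers(a, b): count dict of b, then one pass over a keeping unmatched chars
def pvLeftovers (a b : List Char) : List Char :=
  let remaining := b.foldl (fun (d : PySem.Dict Char Int) ch => d.insert ch (d.getD ch 0 + 1)) PySem.Dict.empty
  (a.foldl
    (fun (st : PySem.Dict Char Int × List Char) ch =>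
      if st.1.getD ch 0 > 0 then (st.1.insert ch (st.1.getD ch 0 - 1), st.2)
      else (st.1, st.2 ++ [ch]))
    (remaining, ([] : List Char))).2

def flames_calculator_alt (name1 : String) (name2 : String) : List String :=
  (pvLeftovers name1.toList name2.toList ++ pvLeftovers name2.toList name1.toList).map
    (fun c => c.toString)

-- ===== PRECONDITION & SPEC =====
def Spec_flames_calculator (name1 : String) (name2 : String) (out : List String) : Prop := out = flames_calculator_alt name1 name2
instance (name1 : String) (name2 : String) (out : List String) : Decidable (Spec_flames_calculator name1 name2 out) := by unfold Spec_flames_calculator; infer_instance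

-- ===== CLAIM (what is proved, stated in full; the proofs are below) =====
def Claim_equal_flames_calculator : Prop := ∀ (name1 : String) (name2 : String), Dom_flames_calculator name1 name2 → Spec_flames_calculator name1 name2 (flames_calculator name1 name2)

-- ===== LEMMAS AND PROOFS =====

-- the common characterisation: chars of xs surviving multiset-cancellation against ys, in order
def pvSurv : List Char → List Char → List Char
  | [], _ => []
  | x :: t, ys => if x ∈ ys then pvSurv t (ys.erase x) else x :: pvSurv t ys

lemma pvSurv_erase : ∀ (xs ys : List Char) (i : Char), i ∈ xs →
    pvSurv (xs.erase i) ys = pvSurv xs (i :: ys) := by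
  intro xs
  induction xs with
  | nil => intro ys i h; simp at h
  | cons x t ih =>
    intro ys i h
    by_cases hxi : x = i
    · subst hxi
      simp [List.erase_cons_head, pvSurv, List.erase_cons_head]
    · have hit : i ∈ t := by
        rcases List.mem_cons.mp h with h' | h'
        · exact absurd h'.symm hxi
        · exact h'
      rw [List.erase_cons_tail (by simp [hxi])]
      by_cases hxy : x ∈ ys
      · have : (i :: ys).erase x = i :: ys.erase x :=
          List.erase_cons_tail (by simp [Ne.symm hxi])
        simp only [pvSurv, hxy, if_pos (List.mem_cons_of_mem i hxy), this]
        exact ih (ys.erase x) i hit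
      · have hxiy : x ∉ i :: ys := by simp [hxy, hxi]
        simp only [pvSurv, if_neg hxy, if_neg hxiy]
        rw [ih ys i hit]

lemma pvSurv_not_mem : ∀ (xs ys : List Char) (i : Char), i ∉ xs →
    pvSurv xs (i :: ys) = pvSurv xs ys := by
  intro xs
  induction xs with
  | nil => intro ys i _; simp [pvSurv]
  | cons x t ih =>
    intro ys i h
    have hxi : x ≠ i := fun e => h (by simp [e])
    have hit : i ∉ t := fun e => h (List.mem_cons_of_mem _ e)
    by_cases hxy : x ∈ ys
    · have : (i :: ys).erase x = i :: ys.erase x :=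
        List.erase_cons_tail (by simp [Ne.symm hxi])
      simp only [pvSurv, if_pos hxy, if_pos (List.mem_cons_of_mem i hxy), this]
      exact ih (ys.erase x) i hit
    · have hxiy : x ∉ i :: ys := by simp [hxy, hxi]
      simp only [pvSurv, if_neg hxy, if_neg hxiy]
      rw [ih ys i hit]

lemma pvSurv_nil : ∀ xs : List Char, pvSurv xs [] = xs := by
  intro xs
  induction xs with
  | nil => rfl
  | cons x t ih => simp [pvSurv, ih]

-- A's loop computes pvSurv on both sides
lemma loopA : ∀ (ys xs s2 : List Char),
    ys.foldl
      (fun (st : List Char × List Char) i =>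
        if i ∈ st.1 then (st.1.erase i, st.2) else (st.1, st.2 ++ [i]))
      (xs, s2)
    = (pvSurv xs ys, s2 ++ pvSurv ys xs) := by
  intro ys
  induction ys with
  | nil => intro xs s2; simp [pvSurv, pvSurv_nil]
  | cons i t ih =>
    intro xs s2
    by_cases h : i ∈ xs
    · simp only [List.foldl_cons, if_pos h]
      rw [ih (xs.erase i) s2, pvSurv_erase xs t i h]
      simp [pvSurv, h]
    · simp only [List.foldl_cons, if_neg h]
      rw [ih xs (s2 ++ [i]), pvSurv_not_mem xs t i h]
      simp [pvSurv, h]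

-- building the count dict
lemma buildCount : ∀ (b : List Char) (d : PySem.Dict Char Int) (ch : Char),
    (b.foldl (fun (d : PySem.Dict Char Int) ch => d.insert ch (d.getD ch 0 + 1)) d).getD ch 0
      = d.getD ch 0 + (b.count ch : Int) := by
  intro b
  induction b with
  | nil => intro d ch; simp
  | cons y t ih =>
    intro d ch
    simp only [List.foldl_cons]
    rw [ih]
    rw [PySem.Dict.getD_insert]
    by_cases h : ch = y
    · subst h; simp; ring
    · simp [h, Ne.symm h]

-- B's second pass computes pvSurv, given the dict carries the counts of b
lemma loopB : ∀ (a b : List Char) (d : PySem.Dict Char Int) (acc : List Char),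
    (∀ ch, d.getD ch 0 = (b.count ch : Int)) →
    (a.foldl
      (fun (st : PySem.Dict Char Int × List Char) ch =>
        if st.1.getD ch 0 > 0 then (st.1.insert ch (st.1.getD ch 0 - 1), st.2)
        else (st.1, st.2 ++ [ch]))
      (d, acc)).2
    = acc ++ pvSurv a b := by
  intro a
  induction a with
  | nil => intro b d acc _; simp [pvSurv]
  | cons x t ih =>
    intro b d acc hd
    by_cases hpos : d.getD x 0 > 0
    · have hxb : x ∈ b := by
        have := hd x
        rw [this] at hpos
        exact List.count_pos_iff.mp (by exact_mod_cast hpos)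
      have hinv : ∀ ch, (d.insert x (d.getD x 0 - 1)).getD ch 0 = ((b.erase x).count ch : Int) := by
        intro ch
        rw [PySem.Dict.getD_insert]
        by_cases h : ch = x
        · subst h
          rw [if_pos rfl, hd ch, List.count_erase_self]
          have h1 : 1 ≤ b.count ch := List.count_pos_iff.mpr hxb
          push_cast [Nat.cast_sub h1]
          ring
        · rw [if_neg h, hd ch, List.count_erase_of_ne h]
      simp only [List.foldl_cons, if_pos hpos]
      rw [ih (b.erase x) _ acc hinv]
      simp [pvSurv, hxb]
    · have hnx : x ∉ b := by
        intro hm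
        have h1 : 0 < b.count x := List.count_pos_iff.mpr hm
        have h2 := hd x
        omega
      simp only [List.foldl_cons, if_neg hpos]
      rw [ih b d (acc ++ [x]) hd]
      simp [pvSurv, hnx]

lemma pvLeftovers_eq (a b : List Char) : pvLeftovers a b = pvSurv a b := by
  unfold pvLeftovers
  rw [loopB a b _ [] (fun ch => by rw [buildCount]; simp)]
  simp

-- ===== VERDICT (by name: the statement is the Claim_ definition above) =====
theorem flames_calculator_spec : Claim_equal_flames_calculator := by
  intro name1 name2 _
  unfold Spec_flames_calculator flames_calculator flames_calculator_alt
  rw [loopA, pvLeftovers_eq, pvLeftovers_eq]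
  simp
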